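-- pv_equiv track=rewrite | github.com/KodCode-AI/kodcode | demo/SFT_KodCode_leetcode_100_1741214688/cross_verification_SFT_KodCode_leetcode_100_1741214688/Leetcode_00000056_C/trial_r1_1/solution.py | max_distinct_elements_in_subarray
-- ===== SOURCE A (Python) =====
-- from collections import defaultdict
--
-- def max_distinct_elements_in_subarray(nums: list[int], k: int) -> int:
--     if k == 0 or len(nums) < k:
--         return 0
--
--     count_map = defaultdict(int)
--     max_distinct = 0
--     current_distinct = 0
--     left = 0
--
--     for right in range(len(nums)):
--         num = nums[right]
--         if count_map[num] == 0:
--             current_distinct += 1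
--         count_map[num] += 1
--
--         # Ensure the window size does not exceed k
--         while right - left + 1 > k:
--             left_num = nums[left]
--             count_map[left_num] -= 1
--             if count_map[left_num] == 0:
--                 current_distinct -= 1
--             left += 1
--
--         # Update max_distinct if the current window is exactly size k
--         if right - left + 1 == k:
--             if current_distinct > max_distinct:
--                 max_distinct = current_distinct
--
--     return max_distinct
-- ===== SOURCE B (Python) =====
-- def max_distinct_elements_in_subarray(nums: list[int], k: int) -> int:
--     if k <= 0 or len(nums) < k:
--         return 0
--     best = 0
--     for i in range(len(nums) - k + 1):
--         best = max(best, len(set(nums[i:i+k])))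
--     return best
-- ===== Notes on version B (the rewrite author's own statement) =====
-- stated objective: simpler
-- what changed: Replaces the incremental count-map sliding window (running distinct counter, left pointer, while-loop shrink) with an independent per-start recomputation: for each window start i the distinct count is len(set(nums[i:i+k])), folded into a running maximum.
import Mathlib
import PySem

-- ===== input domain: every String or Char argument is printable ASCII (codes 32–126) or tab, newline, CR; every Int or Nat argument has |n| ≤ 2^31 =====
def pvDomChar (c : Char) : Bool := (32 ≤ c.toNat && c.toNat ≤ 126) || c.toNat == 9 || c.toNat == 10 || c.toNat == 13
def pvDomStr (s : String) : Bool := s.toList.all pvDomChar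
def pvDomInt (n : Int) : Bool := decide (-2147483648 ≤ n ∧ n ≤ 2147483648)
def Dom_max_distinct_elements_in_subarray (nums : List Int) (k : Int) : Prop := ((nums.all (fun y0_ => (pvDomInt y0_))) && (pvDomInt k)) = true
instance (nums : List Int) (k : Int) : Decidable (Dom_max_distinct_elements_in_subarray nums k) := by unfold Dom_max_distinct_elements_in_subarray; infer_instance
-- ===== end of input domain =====

-- B replaces A's incremental count-map sliding window with a per-start recomputation
-- (max of len(set(nums[i:i+k]))) — simpler, not faster; A raises IndexError for k < 0
-- on a nonempty list, which Pre_ excludes.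

-- ===== PORT A =====
-- the 'while right - left + 1 > k' loop, as fuelled recursion; state = (count_map, current_distinct, left)
def pvShrinkA (nums : List Int) (k right : Int) : Nat → PySem.Dict Int Int → Int → Int → PySem.Dict Int Int × Int × Int
  | 0, cm, curd, left => (cm, curd, left)
  | fuel+1, cm, curd, left =>
    if right - left + 1 > k then
      let leftNum := PySem.List.pyGetD nums left 0
      let cm' := cm.insert leftNum (cm.getD leftNum 0 - 1)
      let curd' := if cm'.getD leftNum 0 = 0 then curd - 1 else curd
      pvShrinkA nums k right fuel cm' curd' (left + 1)
    else (cm, curd, left)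

-- one iteration of 'for right in range(len(nums))'; state = (count_map, max_distinct, current_distinct, left)
def pvStepA (nums : List Int) (k : Int) (st : PySem.Dict Int Int × Int × Int × Int) (r : Nat) :
    PySem.Dict Int Int × Int × Int × Int :=
  let num := nums.getD r 0
  let curd1 := if st.1.getD num 0 = 0 then st.2.2.1 + 1 else st.2.2.1
  let cm1 := st.1.insert num (st.1.getD num 0 + 1)
  let res := pvShrinkA nums k (r : Int) (nums.length + 1) cm1 curd1 st.2.2.2
  let maxd2 := if (r : Int) - res.2.2 + 1 = k then (if res.2.1 > st.2.1 then res.2.1 else st.2.1) else st.2.1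
  (res.1, maxd2, res.2.1, res.2.2)

def max_distinct_elements_in_subarray (nums : List Int) (k : Int) : Int :=
  if k = 0 ∨ (nums.length : Int) < k then 0
  else ((List.range nums.length).foldl (pvStepA nums k) (PySem.Dict.empty, 0, 0, 0)).2.1

-- ===== PORT B =====
def pvWinDistinct (nums : List Int) (k : Int) (i : Nat) : Int :=
  PySem.Set.len (PySem.Set.ofList (PySem.List.slice nums (some (i : Int)) (some ((i : Int) + k))))

def max_distinct_elements_in_subarray_alt (nums : List Int) (k : Int) : Int :=
  if k ≤ 0 ∨ (nums.length : Int) < k then 0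
  else (List.range (nums.length - k.toNat + 1)).foldl
    (fun best i => max best (pvWinDistinct nums k i)) 0

-- ===== PRECONDITION & SPEC =====
-- Pre_ excludes k < 0 with a nonempty list: there A's shrink loop raises IndexError (nums[left] past the end).
def Pre_max_distinct_elements_in_subarray (nums : List Int) (k : Int) : Prop := 0 ≤ k ∨ nums = []
instance (nums : List Int) (k : Int) : Decidable (Pre_max_distinct_elements_in_subarray nums k) := by unfold Pre_max_distinct_elements_in_subarray; infer_instance
def pvWitness_max_distinct_elements_in_subarray : List Int × Int := ([1, 2, 1, 3], 2)

def Spec_max_distinct_elements_in_subarray (nums : List Int) (k : Int) (out : Int) : Prop := out = max_distinct_elements_in_subarray_alt nums k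
instance (nums : List Int) (k : Int) (out : Int) : Decidable (Spec_max_distinct_elements_in_subarray nums k out) := by unfold Spec_max_distinct_elements_in_subarray; infer_instance

-- ===== CLAIM (what is proved, stated in full; the proofs are below) =====
def Claim_equal_max_distinct_elements_in_subarray : Prop := ∀ (nums : List Int) (k : Int), Dom_max_distinct_elements_in_subarray nums k → Pre_max_distinct_elements_in_subarray nums k → Spec_max_distinct_elements_in_subarray nums k (max_distinct_elements_in_subarray nums k)

-- ===== LEMMAS AND PROOFS =====

-- the window of the last K of the first m elements, its distinct count, and the best over all complete windows
def pvWin (nums : List Int) (K m : Nat) : List Int := (nums.take m).drop (m - K)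
def pvD (w : List Int) : Int := ((PySem.List.dedup w).length : Int)
def pvBest (nums : List Int) (K m : Nat) : Int :=
  (List.range (m + 1 - K)).foldl (fun b i => max b (pvD ((nums.drop i).take K))) 0

def pvInv (nums : List Int) (K m : Nat) (st : PySem.Dict Int Int × Int × Int × Int) : Prop :=
  (∀ x, st.1.getD x 0 = ((pvWin nums K m).count x : Int)) ∧
  st.2.1 = pvBest nums K m ∧
  st.2.2.1 = pvD (pvWin nums K m) ∧
  st.2.2.2 = ((m - K : Nat) : Int)

lemma pvShrinkA_stop (nums : List Int) (k right : Int) (f : Nat) (cm : PySem.Dict Int Int)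
    (curd left : Int) (h : ¬ right - left + 1 > k) :
    pvShrinkA nums k right f cm curd left = (cm, curd, left) := by
  cases f <;> simp [pvShrinkA, h]

lemma pvShrinkA_go (nums : List Int) (k right : Int) (f : Nat) (cm : PySem.Dict Int Int)
    (curd left : Int) (h : right - left + 1 > k) :
    pvShrinkA nums k right (f+1) cm curd left =
      pvShrinkA nums k right f
        (cm.insert (PySem.List.pyGetD nums left 0) (cm.getD (PySem.List.pyGetD nums left 0) 0 - 1))
        (if (cm.insert (PySem.List.pyGetD nums left 0) (cm.getD (PySem.List.pyGetD nums left 0) 0 - 1)).getD (PySem.List.pyGetD nums left 0) 0 = 0 then curd - 1 else curd)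
        (left + 1) := by
  simp [pvShrinkA, h]

lemma pvD_eq (w : List Int) : pvD w = (w.toFinset.card : Int) := by
  unfold pvD
  rw [← List.toFinset_card_of_nodup (PySem.List.nodup_dedup w)]
  have h : (PySem.List.dedup w).toFinset = w.toFinset := by
    ext a; simp
  rw [h]

lemma pvD_append (w : List Int) (v : Int) : pvD (w ++ [v]) = pvD w + (if v ∈ w then 0 else 1) := by
  rw [pvD_eq, pvD_eq]
  have hfs : (w ++ [v]).toFinset = insert v w.toFinset := by ext a; simp
  rw [hfs]
  by_cases h : v ∈ w
  · rw [Finset.card_insert_of_mem (List.mem_toFinset.mpr h), if_pos h]; ring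
  · rw [Finset.card_insert_of_notMem (by simpa using h), if_neg h]; push_cast; ring

lemma pvD_cons (a : Int) (w : List Int) : pvD (a :: w) = pvD w + (if a ∈ w then 0 else 1) := by
  rw [pvD_eq, pvD_eq, List.toFinset_cons]
  by_cases h : a ∈ w
  · rw [Finset.card_insert_of_mem (List.mem_toFinset.mpr h), if_pos h]; ring
  · rw [Finset.card_insert_of_notMem (by simpa using h), if_neg h]; push_cast; ring

lemma pv_max_if (a b : Int) : (if b > a then b else a) = max a b := by
  split <;> omega

lemma pvStepA_inv (nums : List Int) (K m : Nat) (st : PySem.Dict Int Int × Int × Int × Int)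
    (hK : 1 ≤ K) (hm : m < nums.length) (hinv : pvInv nums K m st) :
    pvInv nums K (m+1) (pvStepA nums (K : Int) st m) := by
  obtain ⟨hcm, hmax, hcur, hleft⟩ := hinv
  have hv : nums.getD m 0 = nums[m] := List.getD_eq_getElem nums 0 hm
  have hP : (nums.take (m+1)).drop (m - K) = pvWin nums K m ++ [nums[m]] := by
    rw [List.take_succ_eq_append_getElem hm,
        List.drop_append_of_le_length (by simp; omega)]
    rfl
  have hcm1 : ∀ x, (st.1.insert nums[m] (st.1.getD nums[m] 0 + 1)).getD x 0
      = (((pvWin nums K m ++ [nums[m]]).count x : Nat) : Int) := by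
    intro x
    rw [PySem.Dict.getD_insert]
    by_cases hx : x = nums[m]
    · subst hx; simp [hcm, List.count_append]
    · simp [hx, hcm, List.count_append, Ne.symm hx]
  have hcur1 : (if st.1.getD nums[m] 0 = 0 then st.2.2.1 + 1 else st.2.2.1)
      = pvD (pvWin nums K m ++ [nums[m]]) := by
    rw [hcm (nums[m]), hcur, pvD_append]
    by_cases hmem : nums[m] ∈ pvWin nums K m
    · have h1 : (pvWin nums K m).count nums[m] ≠ 0 := by
        have := List.count_pos_iff.mpr hmem; omega
      rw [if_neg (by exact_mod_cast h1), if_pos hmem]; ring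
    · have h1 : (pvWin nums K m).count nums[m] = 0 := List.count_eq_zero.mpr hmem
      rw [h1]; simp [hmem]
  by_cases hmK : m + 1 ≤ K
  · -- window not yet full: the while loop does not run
    have hz : m - K = 0 := by omega
    have hz1 : m + 1 - K = 0 := by omega
    have hwin1 : pvWin nums K (m+1) = pvWin nums K m ++ [nums[m]] := by
      have h : pvWin nums K (m+1) = (nums.take (m+1)).drop (m - K) := by
        unfold pvWin; congr 1; omega
      rw [h, hP]
    have hstop : pvShrinkA nums (K : Int) (m : Int) (nums.length + 1)
        (st.1.insert nums[m] (st.1.getD nums[m] 0 + 1))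
        (if st.1.getD nums[m] 0 = 0 then st.2.2.1 + 1 else st.2.2.1) st.2.2.2
        = (st.1.insert nums[m] (st.1.getD nums[m] 0 + 1),
           (if st.1.getD nums[m] 0 = 0 then st.2.2.1 + 1 else st.2.2.1), st.2.2.2) := by
      apply pvShrinkA_stop
      rw [hleft]; omega
    simp only [pvStepA, hv, hstop]
    refine ⟨fun x => by rw [hcm1 x, hwin1], ?_, by rw [hcur1, hwin1], by rw [hleft]; omega⟩
    -- max_distinct component
    rw [hleft, hz]
    by_cases hfull : m + 1 = K
    · have hcond : (m : Int) - ((0 : Nat) : Int) + 1 = (K : Int) := by push_cast; omega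
      rw [if_pos hcond, hcur1, hmax, pv_max_if]
      unfold pvBest
      have r1 : m + 1 + 1 - K = 1 := by omega
      rw [hz1, r1]
      simp only [List.range_zero, List.foldl_nil, List.range_one, List.foldl_cons,
        List.foldl_nil, List.drop_zero]
      have hTK : pvWin nums K m ++ [nums[m]] = nums.take K := by
        rw [← hP, hz, List.drop_zero, hfull]
      rw [hTK]
    · have hcond : ¬ ((m : Int) - ((0 : Nat) : Int) + 1 = (K : Int)) := by push_cast; omega
      rw [if_neg hcond, hmax]
      unfold pvBest
      have r1 : m + 1 + 1 - K = 0 := by omega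
      rw [hz1, r1]
  · -- window full: the while loop runs exactly once
    have hKm : K ≤ m := by omega
    have hlt : m - K < nums.length := by omega
    have hgetLeft : PySem.List.pyGetD nums (((m - K : Nat) : Int)) (0 : Int) = nums[m - K] := by
      rw [PySem.List.pyGetD_natCast]
      exact List.getD_eq_getElem nums 0 hlt
    have hPa : pvWin nums K m ++ [nums[m]] = nums[m - K] :: pvWin nums K (m+1) := by
      rw [← hP]
      have hlen : m - K < (nums.take (m+1)).length := by simp; omega
      rw [List.drop_eq_getElem_cons hlen]
      congr 1
      · exact List.getElem_take
      · unfold pvWin; congr 1; omega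
    set a := nums[m - K] with hadef
    set W := pvWin nums K (m+1) with hWdef
    -- counts after the decrement
    have hcm2 : ∀ x, ((st.1.insert nums[m] (st.1.getD nums[m] 0 + 1)).insert a
        ((st.1.insert nums[m] (st.1.getD nums[m] 0 + 1)).getD a 0 - 1)).getD x 0
        = ((W.count x : Nat) : Int) := by
      intro x
      rw [PySem.Dict.getD_insert]
      by_cases hx : x = a
      · subst hx
        rw [if_pos rfl, hcm1 a, hPa, List.count_cons_self]
        push_cast; ring
      · rw [if_neg hx, hcm1 x, hPa, List.count_cons_of_ne (Ne.symm hx)]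
    -- distinct count after the decrement
    have hcur2 : (if ((st.1.insert nums[m] (st.1.getD nums[m] 0 + 1)).insert a
        ((st.1.insert nums[m] (st.1.getD nums[m] 0 + 1)).getD a 0 - 1)).getD a 0 = 0
        then (if st.1.getD nums[m] 0 = 0 then st.2.2.1 + 1 else st.2.2.1) - 1
        else (if st.1.getD nums[m] 0 = 0 then st.2.2.1 + 1 else st.2.2.1))
        = pvD W := by
      rw [hcm2 a, hcur1, hPa, pvD_cons]
      by_cases hmem : a ∈ W
      · have h1 : W.count a ≠ 0 := by
          have := List.count_pos_iff.mpr hmem; omega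
        rw [if_neg (by exact_mod_cast h1), if_pos hmem]; ring
      · have h1 : W.count a = 0 := List.count_eq_zero.mpr hmem
        rw [h1]; simp [hmem]
    have hshrink : pvShrinkA nums (K : Int) (m : Int) (nums.length + 1)
        (st.1.insert nums[m] (st.1.getD nums[m] 0 + 1))
        (if st.1.getD nums[m] 0 = 0 then st.2.2.1 + 1 else st.2.2.1) st.2.2.2
        = ((st.1.insert nums[m] (st.1.getD nums[m] 0 + 1)).insert a
            ((st.1.insert nums[m] (st.1.getD nums[m] 0 + 1)).getD a 0 - 1),
           (if ((st.1.insert nums[m] (st.1.getD nums[m] 0 + 1)).insert a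
             ((st.1.insert nums[m] (st.1.getD nums[m] 0 + 1)).getD a 0 - 1)).getD a 0 = 0
             then (if st.1.getD nums[m] 0 = 0 then st.2.2.1 + 1 else st.2.2.1) - 1
             else (if st.1.getD nums[m] 0 = 0 then st.2.2.1 + 1 else st.2.2.1)),
           st.2.2.2 + 1) := by
      rw [hleft]
      rw [pvShrinkA_go nums (K : Int) (m : Int) nums.length _ _ _ (by omega)]
      rw [hgetLeft]
      apply pvShrinkA_stop
      omega
    simp only [pvStepA, hv, hshrink]
    refine ⟨fun x => hcm2 x, ?_, hcur2,
      by show st.2.2.2 + 1 = ((m + 1 - K : Nat) : Int); rw [hleft]; omega⟩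
    -- max_distinct component
    simp only []
    have hcond : (m : Int) - (st.2.2.2 + 1) + 1 = (K : Int) := by
      rw [hleft]; omega
    have hW' : W = (nums.drop (m + 1 - K)).take K := by
      rw [hWdef]; unfold pvWin
      rw [List.drop_take]
      congr 1
      omega
    rw [if_pos hcond, hcur2, hmax, pv_max_if, hW']
    unfold pvBest
    have r1 : m + 1 + 1 - K = (m + 1 - K) + 1 := by omega
    rw [r1, List.range_succ, List.foldl_append, List.foldl_cons, List.foldl_nil]

lemma pvFoldA (nums : List Int) (K : Nat) (hK : 1 ≤ K) :
    ∀ m, m ≤ nums.length →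
      pvInv nums K m ((List.range m).foldl (pvStepA nums (K : Int)) (PySem.Dict.empty, 0, 0, 0)) := by
  intro m
  induction m with
  | zero =>
    intro _
    refine ⟨fun x => by simp [pvWin], ?_, ?_, by simp⟩
    · unfold pvBest
      have h0 : 0 + 1 - K = 0 := by omega
      rw [h0]; simp
    · simp [pvWin, pvD, PySem.List.dedup]
  | succ m ih =>
    intro h
    rw [List.range_succ, List.foldl_append, List.foldl_cons, List.foldl_nil]
    exact pvStepA_inv nums K m _ hK (by omega) (ih (by omega))

-- ===== VERDICT (by name: the statement is the Claim_ definition above) =====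
theorem max_distinct_elements_in_subarray_spec : Claim_equal_max_distinct_elements_in_subarray := by
  intro nums k _ hpre
  unfold Spec_max_distinct_elements_in_subarray
  unfold max_distinct_elements_in_subarray max_distinct_elements_in_subarray_alt
  by_cases hk0 : k ≤ 0
  · rw [if_pos (Or.inl hk0)]
    rcases lt_or_eq_of_le hk0 with hlt | heq
    · have hnil : nums = [] := by
        rcases hpre with h | h
        · omega
        · exact h
      subst hnil
      rw [if_neg (by simp; omega)]
      rfl
    · rw [if_pos (Or.inl heq)]
  · push_neg at hk0
    by_cases hnk : (nums.length : Int) < k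
    · rw [if_pos (Or.inr hnk), if_pos (Or.inr hnk)]
    · rw [if_neg (by push_neg; exact ⟨by omega, by omega⟩),
          if_neg (by push_neg; exact ⟨by omega, by omega⟩)]
      set K := k.toNat with hKdef
      have hkK : k = (K : Int) := by omega
      have hK1 : 1 ≤ K := by omega
      have hKn : K ≤ nums.length := by omega
      have hinv := pvFoldA nums K hK1 nums.length (le_refl _)
      rw [hkK, hinv.2.1]
      unfold pvBest
      have hr : nums.length + 1 - K = nums.length - K + 1 := by omega
      rw [hr]
      apply PySem.List.foldl_congr_mem
      intro acc i hi
      unfold pvWinDistinct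
      rw [PySem.List.slice_natCast_add, ← PySem.List.dedup_eq_ofList]
      rfl
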